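-- pv_equiv track=rewrite | github.com/ijieun/Algorithm | Programmers/완전탐색/84512.py | solution
-- ===== SOURCE A (Python) =====
-- from itertools import product
--
-- def solution(word):
--     target = ['A','E','I','O','U']
--     arr = []
--     # 1~5 길이의 중복 순열 생성(repeat 로 반복. product는 중복조합)
--     for i in range(1,6):
--         arr += list(map("".join, product(target, repeat=i)))
--
--     # 정렬
--     arr.sort()
--     # 하나씩 돌면서 index 확인. word와 같으면 +1해서 리턴
--     for i in range(len(arr)):
--         if arr[i]==word:
--             return i+1
-- ===== SOURCE B (Python) =====
-- def solution(word):
--     # closed form: each letter contributes index*block_size + 1, block sizes 781,156,31,6,1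
--     weights = [781, 156, 31, 6, 1]
--     total = 0
--     for c, w in zip(word, weights):
--         total += "AEIOU".index(c) * w + 1
--     return total
-- ===== Notes on version B (the rewrite author's own statement) =====
-- stated objective: simpler
-- what changed: A generates all 3905 vowel words of length 1-5, sorts them and scans for the word's index; B computes the rank directly as a per-letter closed form (vowel index times block size [781,156,31,6,1] plus 1 per position).
-- outside the precondition, e.g. on solution('XY'): A returns None, B raises ValueError; on solution(''): A returns None, B returns 0
import Mathlib
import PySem

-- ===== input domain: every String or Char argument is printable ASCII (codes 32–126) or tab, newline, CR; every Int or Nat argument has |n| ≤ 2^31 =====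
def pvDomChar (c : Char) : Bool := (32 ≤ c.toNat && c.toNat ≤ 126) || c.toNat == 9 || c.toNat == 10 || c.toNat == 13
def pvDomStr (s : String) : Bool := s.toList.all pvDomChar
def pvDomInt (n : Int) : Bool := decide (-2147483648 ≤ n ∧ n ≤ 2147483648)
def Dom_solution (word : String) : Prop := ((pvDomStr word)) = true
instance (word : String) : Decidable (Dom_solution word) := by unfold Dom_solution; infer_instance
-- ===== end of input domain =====

-- B replaces A's generate-3905-strings-then-sort-then-scan by a per-letter closed form (vowel index × block size + 1 per position).

-- ===== PORT A =====
-- target = ['A','E','I','O','U']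
def pvTarget : List String := ["A", "E", "I", "O", "U"]

-- itertools.product(target, repeat=n), ported by hand: exact — tuples in product order (first coordinate outermost)
def pvProduct (target : List String) : Nat → List (List String)
  | 0 => [[]]
  | n + 1 => target.flatMap (fun c => (pvProduct target n).map (fun t => c :: t))

-- the final 'for i in range(len(arr)): if arr[i]==word: return i+1' loop;
-- when nothing matches Python falls off the end and returns None (not an int) — excluded by Pre_; 0 here.
def pvFind : List String → String → Int → Int
  | [], _, _ => 0
  | a :: rest, w, i => if a = w then i + 1 else pvFind rest w (i + 1)

def solution (word : String) : Int :=
  let arr : List String :=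
    (PySem.List.pyRange 1 6).foldl
      (fun arr i => arr ++ (pvProduct pvTarget i.toNat).map (fun t => PySem.Str.join "" t)) []
  let arr := PySem.List.sorted arr (fun x => x)
  pvFind arr word 0

-- ===== PORT B =====
-- "AEIOU".index(c); the ValueError case (c not a vowel) lies outside Pre_, 0 here
def pvVidx (c : Char) : Int := (((PySem.List.index? "AEIOU".toList c).getD 0 : Nat) : Int)

def solution_alt (word : String) : Int :=
  let weights : List Int := [781, 156, 31, 6, 1]
  (word.toList.zip weights).foldl (fun total cw => total + pvVidx cw.1 * cw.2 + 1) 0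

-- ===== PRECONDITION & SPEC =====
-- Pre_ excludes exactly the words that are not a string of 1–5 letters from AEIOU: on those A's
-- scan finds nothing, falls off the loop and returns None, which is not a value of the return type Int.
def Pre_solution (word : String) : Prop :=
  word.toList ≠ [] ∧ word.toList.length ≤ 5 ∧ word.toList ⊆ (['A', 'E', 'I', 'O', 'U'] : List Char)
instance (word : String) : Decidable (Pre_solution word) := by unfold Pre_solution; infer_instance

def pvWitness_solution : String := "AEIOU"

def Spec_solution (word : String) (out : Int) : Prop := out = solution_alt word
instance (word : String) (out : Int) : Decidable (Spec_solution word out) := by unfold Spec_solution; infer_instance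

-- ===== CLAIM (what is proved, stated in full; the proofs are below) =====
def Claim_equal_solution : Prop := ∀ (word : String), Dom_solution word → Pre_solution word → Spec_solution word (solution word)

-- ===== LEMMAS AND PROOFS =====

def pvVowels : List Char := ['A', 'E', 'I', 'O', 'U']

-- the sorted list of all vowel words of length 1..k
def SL : Nat → List (List Char)
  | 0 => []
  | k + 1 => pvVowels.flatMap (fun c => [c] :: (SL k).map (c :: ·))

def SS (k : Nat) : List String := (SL k).map String.ofList

-- the vowel words of length exactly n, in itertools.product order
def W : Nat → List (List Char)
  | 0 => [[]]
  | n + 1 => pvVowels.flatMap (fun c => (W n).map (c :: ·))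

-- closed-form rank of a word inside SL k
def rkw : Nat → List Char → Int
  | _, [] => 0
  | 0, _ :: _ => 0
  | k + 1, c :: rest => ((pvVowels.idxOf c : Nat) : Int) * (((SL k).length : Nat) + 1) + 1 + rkw k rest

-- pvFind mirrored at the List-Char level
def findL : List (List Char) → List Char → Int → Int
  | [], _, _ => 0
  | a :: rest, w, i => if a = w then i + 1 else findL rest w (i + 1)

theorem str_ext {a b : String} (h : a.toList = b.toList) : a = b := by
  rw [← String.ofList_toList (s := a), h, String.ofList_toList]

theorem pvFind_map_ofList (L : List (List Char)) (w : String) (i : Int) :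
    pvFind (L.map String.ofList) w i = findL L w.toList i := by
  induction L generalizing i with
  | nil => rfl
  | cons l L ih =>
      by_cases h : l = w.toList
      · subst h
        simp [pvFind, findL, String.ofList_toList]
      · have h2 : String.ofList l ≠ w := by
          intro he
          exact h (by rw [← he, String.toList_ofList])
        simp [pvFind, findL, h, h2, ih]

theorem findL_append (xs ys : List (List Char)) (w : List Char) (i : Int) :
    findL (xs ++ ys) w i = if w ∈ xs then findL xs w i else findL ys w (i + xs.length) := by
  induction xs generalizing i with
  | nil => simp [findL]
  | cons x xs ih =>
      by_cases h : x = w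
      · subst h
        simp [findL]
      · have hne : ¬ (w = x) := fun he => h he.symm
        simp only [List.cons_append, findL, h, if_false, ih, List.mem_cons, hne, false_or,
          List.length_cons]
        split_ifs <;> [rfl; (congr 1; push_cast; ring)]

theorem findL_map_cons (L : List (List Char)) (c : Char) (rest : List Char) (i : Int) :
    findL (L.map (c :: ·)) (c :: rest) i = findL L rest i := by
  induction L generalizing i with
  | nil => rfl
  | cons l L ih =>
      by_cases h : l = rest
      · subst h; simp [findL]
      · simp [findL, h, ih]

theorem mem_SL (w : List Char) : ∀ (k : Nat), w ≠ [] → w.length ≤ k →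
    (∀ c ∈ w, c ∈ pvVowels) → w ∈ SL k := by
  induction w with
  | nil => intro k h; exact absurd rfl h
  | cons c rest ih =>
      intro k _ hlen hv
      cases k with
      | zero => simp at hlen
      | succ k =>
          have hlen' : rest.length ≤ k := by
            simp only [List.length_cons] at hlen
            omega
          simp only [SL, List.mem_flatMap]
          refine ⟨c, hv c (by simp), ?_⟩
          rcases eq_or_ne rest [] with hr | hr
          · subst hr; simp
          · refine List.mem_cons.mpr (Or.inr ?_)
            exact List.mem_map.mpr ⟨rest, ih k hr hlen' (fun d hd => hv d (by simp [hd])), rfl⟩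

-- one scan across the five blocks of SL (k+1)
theorem findL_blocks (k : Nat) (c : Char) (rest : List Char)
    (hrest : rest ≠ [] → rest.length ≤ k ∧ ∀ d ∈ rest, d ∈ pvVowels)
    (hrec : rest ≠ [] → ∀ j : Int, findL (SL k) rest j = j + rkw k rest) :
    ∀ (cs : List Char), c ∈ cs → ∀ i : Int,
      findL (cs.flatMap (fun c' => [c'] :: (SL k).map (c' :: ·))) (c :: rest) i
        = i + ((cs.idxOf c : Nat) : Int) * (((SL k).length : Nat) + 1) + 1 + rkw k rest := by
  intro cs
  induction cs with
  | nil => intro h; exact absurd h (by simp)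
  | cons c0 cs ih =>
      intro hc i
      rw [List.flatMap_cons]
      by_cases hcc : c0 = c
      · subst hcc
        rcases eq_or_ne rest [] with hr | hr
        · subst hr
          simp [findL, rkw, List.idxOf_cons_self]
        · have hne : ([c0] : List Char) ≠ c0 :: rest := by
            intro he
            injection he with _ h2
            exact hr h2.symm
          have hmem : (c0 :: rest) ∈ (SL k).map (c0 :: ·) :=
            List.mem_map.mpr ⟨rest, mem_SL rest k hr (hrest hr).1 (hrest hr).2, rfl⟩
          rw [List.cons_append, findL, if_neg hne, findL_append, if_pos hmem,
            findL_map_cons, hrec hr (i + 1), List.idxOf_cons_self]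
          push_cast
          ring
      · have hnm : (c :: rest) ∉ ([c0] :: (SL k).map (c0 :: ·)) := by
          intro hmem
          rcases List.mem_cons.mp hmem with he | hmap
          · exact hcc (by injection he.symm)
          · rcases List.mem_map.mp hmap with ⟨t, _, ht⟩
            exact hcc (by injection ht)
        have hc' : c ∈ cs := by
          rcases List.mem_cons.mp hc with he | h
          · exact absurd he.symm hcc
          · exact h
        rw [findL_append, if_neg hnm, ih hc', List.idxOf_cons_ne _ (fun he => hcc he)]
        simp only [List.length_cons, List.length_map]
        push_cast
        ring

theorem findL_SL (w : List Char) : ∀ (k : Nat), w ≠ [] → w.length ≤ k →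
    (∀ c ∈ w, c ∈ pvVowels) → ∀ i : Int, findL (SL k) w i = i + rkw k w := by
  induction w with
  | nil => intro k h; exact absurd rfl h
  | cons c rest ih =>
      intro k _ hlen hv i
      cases k with
      | zero => simp at hlen
      | succ k =>
          have hrest : rest ≠ [] → rest.length ≤ k ∧ ∀ d ∈ rest, d ∈ pvVowels := by
            intro _
            exact ⟨Nat.lt_succ_iff.mp (by simpa using hlen), fun d hd => hv d (by simp [hd])⟩
          have hrec : rest ≠ [] → ∀ j : Int, findL (SL k) rest j = j + rkw k rest := by
            intro hr j
            exact ih k hr (hrest hr).1 (hrest hr).2 j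
          rw [show SL (k + 1) = pvVowels.flatMap (fun c' => [c'] :: (SL k).map (c' :: ·)) from rfl,
            findL_blocks k c rest hrest hrec pvVowels (hv c (by simp)) i]
          simp only [rkw]
          ring

-- ---------- permutation: A's generated list is a rearrangement of SL 5 ----------

theorem flatMap_cons_perm (cs : List Char) (x : Char → List Char) (F : Char → List (List Char)) :
    (cs.flatMap (fun c => x c :: F c)).Perm (cs.map x ++ cs.flatMap F) := by
  induction cs with
  | nil => simp
  | cons c0 cs ih =>
      simp only [List.flatMap_cons, List.map_cons, List.cons_append]
      refine List.Perm.cons _ ?_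
      exact (ih.append_left (F c0)).trans (List.perm_append_comm_assoc _ _ _)

theorem flatMap_append_perm (cs : List Char) (f g : Char → List (List Char)) :
    (cs.flatMap (fun c => f c ++ g c)).Perm (cs.flatMap f ++ cs.flatMap g) := by
  induction cs with
  | nil => simp
  | cons c0 cs ih =>
      simp only [List.flatMap_cons]
      have s1 : ((f c0 ++ g c0) ++ cs.flatMap fun c => f c ++ g c).Perm
          ((f c0 ++ g c0) ++ (cs.flatMap f ++ cs.flatMap g)) := ih.append_left _
      have s2 : ((f c0 ++ g c0) ++ (cs.flatMap f ++ cs.flatMap g)).Perm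
          ((f c0 ++ cs.flatMap f) ++ (g c0 ++ cs.flatMap g)) := by
        rw [List.append_assoc, List.append_assoc]
        exact (List.perm_append_comm_assoc _ _ _).append_left _
      exact s1.trans s2

theorem lift_perm_congr {X Y : List (List Char)} (h : X.Perm Y) (cs : List Char) :
    (cs.flatMap (fun c => X.map (c :: ·))).Perm (cs.flatMap (fun c => Y.map (c :: ·))) := by
  induction cs with
  | nil => simp
  | cons c0 cs ih =>
      simp only [List.flatMap_cons]
      exact (h.map _).append ih

theorem lift_append (X Y : List (List Char)) :
    (pvVowels.flatMap (fun c => (X ++ Y).map (c :: ·))).Perm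
      ((pvVowels.flatMap fun c => X.map (c :: ·)) ++ (pvVowels.flatMap fun c => Y.map (c :: ·))) := by
  have h : (fun c : Char => (X ++ Y).map (c :: ·)) = fun c => X.map (c :: ·) ++ Y.map (c :: ·) := by
    funext c
    exact List.map_append ..
  rw [h]
  exact flatMap_append_perm _ _ _

theorem SL_step (k : Nat) :
    (SL (k + 1)).Perm ((pvVowels.map (fun c => [c])) ++ (pvVowels.flatMap fun c => (SL k).map (c :: ·))) :=
  flatMap_cons_perm pvVowels _ _

theorem W1_eq : pvVowels.map (fun c => [c]) = W 1 := by decide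

theorem SL_perm : (SL 5).Perm (W 1 ++ (W 2 ++ (W 3 ++ (W 4 ++ W 5)))) := by
  have h0 : (pvVowels.flatMap fun c => (SL 0).map (c :: ·)) = [] := by decide
  have h1 : (SL 1).Perm (W 1) := by
    have := SL_step 0
    rw [h0, List.append_nil, W1_eq] at this
    exact this
  have step : ∀ (k : Nat) (Y : List (List Char)), (SL k).Perm Y →
      (SL (k + 1)).Perm (W 1 ++ pvVowels.flatMap fun c => Y.map (c :: ·)) := by
    intro k Y h
    exact (SL_step k).trans (List.Perm.append_left _ ((lift_perm_congr h pvVowels)))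
  have h2 : (SL 2).Perm (W 1 ++ W 2) := (step 1 (W 1) h1).trans (by rfl)
  have h3 : (SL 3).Perm (W 1 ++ (W 2 ++ W 3)) :=
    (step 2 _ h2).trans (List.Perm.append_left _ ((lift_append (W 1) (W 2)).trans (by rfl)))
  have h4 : (SL 4).Perm (W 1 ++ (W 2 ++ (W 3 ++ W 4))) := by
    refine (step 3 _ h3).trans (List.Perm.append_left _ ?_)
    refine (lift_append (W 1) (W 2 ++ W 3)).trans ?_
    exact List.Perm.append_left _ ((lift_append (W 2) (W 3)).trans (by rfl))
  refine (step 4 _ h4).trans (List.Perm.append_left _ ?_)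
  refine (lift_append (W 1) (W 2 ++ (W 3 ++ W 4))).trans ?_
  refine List.Perm.append_left _ ?_
  refine (lift_append (W 2) (W 3 ++ W 4)).trans ?_
  exact List.Perm.append_left _ ((lift_append (W 3) (W 4)).trans (by rfl))

-- ---------- A's generated (pre-sort) list, block by block ----------

def pvArr : List String :=
  (PySem.List.pyRange 1 6).foldl
    (fun arr i => arr ++ (pvProduct pvTarget i.toNat).map (fun t => PySem.Str.join "" t)) []

theorem solution_eq (word : String) :
    solution word = pvFind (PySem.List.sorted pvArr (fun x => x)) word 0 := rfl

theorem join_cons (s : String) (t : List String) :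
    PySem.Str.join "" (s :: t) = String.ofList (s.toList ++ (PySem.Str.join "" t).toList) := by
  apply str_ext
  rw [String.toList_ofList]
  cases t with
  | nil =>
      simp only [PySem.Str.toList_join, List.map_cons, List.map_nil]
      rw [show ("" : String).toList = [] from rfl, PySem.Chars.join_singleton,
        PySem.Chars.join_nil, List.append_nil]
  | cons u t =>
      simp only [PySem.Str.toList_join, List.map_cons]
      rw [show ("" : String).toList = [] from rfl, PySem.Chars.join_cons_cons, List.append_nil]

theorem comp_component (P : List (List String)) (WL : List (List Char))
    (hIH : P.map (fun t => PySem.Str.join "" t) = WL.map String.ofList)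
    (s : String) (c : Char) (hs : s.toList = [c]) :
    P.map (fun t => PySem.Str.join "" (s :: t)) = WL.map (fun l => String.ofList (c :: l)) := by
  calc P.map (fun t => PySem.Str.join "" (s :: t))
      = P.map
          ((fun u => String.ofList (s.toList ++ u.toList)) ∘ (fun t => PySem.Str.join "" t)) := by
        refine List.map_congr_left (fun t _ => ?_)
        exact join_cons s t
    _ = (P.map (fun t => PySem.Str.join "" t)).map
          (fun u => String.ofList (s.toList ++ u.toList)) := by rw [List.map_map]
    _ = (WL.map String.ofList).map (fun u => String.ofList (s.toList ++ u.toList)) := by rw [hIH]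
    _ = WL.map (fun l => String.ofList (c :: l)) := by
        rw [List.map_map]
        refine List.map_congr_left (fun l _ => ?_)
        simp [Function.comp, String.toList_ofList, hs]

theorem pvProduct_join : ∀ (n : Nat),
    (pvProduct pvTarget n).map (fun t => PySem.Str.join "" t) = (W n).map String.ofList := by
  intro n
  induction n with
  | zero => decide
  | succ n ih =>
      show ((pvTarget.flatMap fun s => (pvProduct pvTarget n).map (s :: ·)).map
          (fun t => PySem.Str.join "" t)) = ((pvVowels.flatMap fun c => (W n).map (c :: ·)).map String.ofList)
      simp only [pvTarget, pvVowels, List.flatMap_cons, List.flatMap_nil, List.append_nil,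
        List.map_append, List.map_map, Function.comp_def]
      simp only [pvTarget] at ih
      rw [comp_component _ _ ih "A" 'A' (by decide), comp_component _ _ ih "E" 'E' (by decide),
        comp_component _ _ ih "I" 'I' (by decide), comp_component _ _ ih "O" 'O' (by decide),
        comp_component _ _ ih "U" 'U' (by decide)]

theorem pvArr_perm : (SS 5).Perm pvArr := by
  have hshape : pvArr =
      ((((([] ++ (pvProduct pvTarget 1).map (fun t => PySem.Str.join "" t))
        ++ (pvProduct pvTarget 2).map (fun t => PySem.Str.join "" t))
        ++ (pvProduct pvTarget 3).map (fun t => PySem.Str.join "" t))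
        ++ (pvProduct pvTarget 4).map (fun t => PySem.Str.join "" t))
        ++ (pvProduct pvTarget 5).map (fun t => PySem.Str.join "" t)) := by
    rw [pvArr, show PySem.List.pyRange 1 6 = [1, 2, 3, 4, 5] by decide]
    rfl
  rw [hshape, pvProduct_join 1, pvProduct_join 2, pvProduct_join 3, pvProduct_join 4,
    pvProduct_join 5]
  have := (SL_perm.map String.ofList)
  refine List.Perm.trans (by exact this) ?_
  simp [List.map_append, List.append_assoc]

-- ---------- SL 5 is strictly sorted ----------

theorem shape_SL (k : Nat) (l : List Char) (h : l ∈ SL k) : ∃ c t, c ∈ pvVowels ∧ l = c :: t := by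
  cases k with
  | zero => simp [SL] at h
  | succ k =>
      rcases List.mem_flatMap.mp h with ⟨c, hc, hl⟩
      rcases List.mem_cons.mp hl with he | hmap
      · exact ⟨c, [], hc, he⟩
      · rcases List.mem_map.mp hmap with ⟨t, _, ht⟩
        exact ⟨c, t, hc, ht.symm⟩

theorem pw_blocks (k : Nat) (hk : (SL k).Pairwise (· < ·)) :
    ∀ (cs : List Char), cs.Pairwise (· < ·) →
      (cs.flatMap fun c => [c] :: (SL k).map (c :: ·)).Pairwise (· < ·) := by
  intro cs
  induction cs with
  | nil => simp
  | cons c0 cs ih =>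
      intro hpw
      rcases List.pairwise_cons.mp hpw with ⟨hforall, hcs⟩
      rw [List.flatMap_cons]
      refine List.pairwise_append.mpr ⟨?_, ih hcs, ?_⟩
      · refine List.pairwise_cons.mpr ⟨?_, ?_⟩
        · intro y hy
          rcases List.mem_map.mp hy with ⟨t, ht, rfl⟩
          rcases shape_SL k t ht with ⟨d, t', _, rfl⟩
          exact List.cons_lt_cons_iff.mpr (Or.inr ⟨rfl, List.nil_lt_cons d t'⟩)
        · exact List.pairwise_map.mpr (hk.imp (fun h => List.cons_lt_cons_iff.mpr (Or.inr ⟨rfl, h⟩)))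
      · intro x hx y hy
        have hxc : ∃ tx, x = c0 :: tx := by
          rcases List.mem_cons.mp hx with he | hmap
          · exact ⟨[], he⟩
          · rcases List.mem_map.mp hmap with ⟨t, _, ht⟩
            exact ⟨t, ht.symm⟩
        rcases hxc with ⟨tx, rfl⟩
        rcases List.mem_flatMap.mp hy with ⟨c1, hc1, hyl⟩
        have hyc : ∃ ty, y = c1 :: ty := by
          rcases List.mem_cons.mp hyl with he | hmap
          · exact ⟨[], he⟩
          · rcases List.mem_map.mp hmap with ⟨t, _, ht⟩
            exact ⟨t, ht.symm⟩
        rcases hyc with ⟨ty, rfl⟩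
        exact List.cons_lt_cons_iff.mpr (Or.inl (hforall c1 hc1))

theorem pw_SL : ∀ (k : Nat), (SL k).Pairwise (· < ·) := by
  intro k
  induction k with
  | zero => simp [SL]
  | succ k ih => exact pw_blocks k ih pvVowels (by decide)

theorem pw_SS : (SS 5).Pairwise (fun a b : String => a < b) := by
  refine List.pairwise_map.mpr ((pw_SL 5).imp ?_)
  intro a b h
  rw [String.lt_iff_toList_lt, String.toList_ofList, String.toList_ofList]
  exact h

theorem sorted_pvArr : PySem.List.sorted pvArr (fun x => x) = SS 5 :=
  PySem.List.sorted_eq_of_perm_of_pairwise_lt pvArr (SS 5) (fun x => x) pvArr_perm pw_SS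

-- ---------- B's fold equals the closed-form rank ----------

theorem vidx_eq (c : Char) (h : c ∈ pvVowels) : pvVidx c = ((pvVowels.idxOf c : Nat) : Int) := by
  fin_cases h <;> decide

set_option maxRecDepth 8000 in
theorem lenSL4 : (SL 4).length = 780 := by decide

set_option maxRecDepth 8000 in
theorem lenSL3 : (SL 3).length = 155 := by decide

theorem lenSL2 : (SL 2).length = 30 := by decide
theorem lenSL1 : (SL 1).length = 5 := by decide
theorem lenSL0 : (SL 0).length = 0 := by decide

theorem alt_eq_rkw (w : List Char) (hne : w ≠ []) (hlen : w.length ≤ 5)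
    (hv : ∀ c ∈ w, c ∈ pvVowels) :
    (w.zip [(781 : Int), 156, 31, 6, 1]).foldl (fun total cw => total + pvVidx cw.1 * cw.2 + 1) 0
      = rkw 5 w := by
  rcases w with _ | ⟨a, _ | ⟨b, _ | ⟨c, _ | ⟨d, _ | ⟨e, _ | ⟨f, t⟩⟩⟩⟩⟩⟩
  · exact absurd rfl hne
  · simp only [List.zip, List.zipWith, List.foldl, rkw, lenSL4]
    rw [vidx_eq a (hv a (by simp))]
    push_cast
    ring
  · simp only [List.zip, List.zipWith, List.foldl, rkw, lenSL4, lenSL3]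
    rw [vidx_eq a (hv a (by simp)), vidx_eq b (hv b (by simp))]
    push_cast
    ring
  · simp only [List.zip, List.zipWith, List.foldl, rkw, lenSL4, lenSL3, lenSL2]
    rw [vidx_eq a (hv a (by simp)), vidx_eq b (hv b (by simp)), vidx_eq c (hv c (by simp))]
    push_cast
    ring
  · simp only [List.zip, List.zipWith, List.foldl, rkw, lenSL4, lenSL3, lenSL2, lenSL1]
    rw [vidx_eq a (hv a (by simp)), vidx_eq b (hv b (by simp)), vidx_eq c (hv c (by simp)),
      vidx_eq d (hv d (by simp))]
    push_cast
    ring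
  · simp only [List.zip, List.zipWith, List.foldl, rkw, lenSL4, lenSL3, lenSL2, lenSL1, lenSL0]
    rw [vidx_eq a (hv a (by simp)), vidx_eq b (hv b (by simp)), vidx_eq c (hv c (by simp)),
      vidx_eq d (hv d (by simp)), vidx_eq e (hv e (by simp))]
    push_cast
    ring
  · simp only [List.length_cons] at hlen
    omega

-- ===== VERDICT (by name: the statement is the Claim_ definition above) =====
theorem solution_spec : Claim_equal_solution := by
  intro word _ hpre
  rcases hpre with ⟨h1, h2, h3⟩
  have h3' : ∀ c ∈ word.toList, c ∈ pvVowels := fun c hc => h3 hc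
  show solution word = solution_alt word
  rw [solution_eq, sorted_pvArr]
  rw [show SS 5 = (SL 5).map String.ofList from rfl, pvFind_map_ofList,
    findL_SL word.toList 5 h1 h2 h3' 0]
  have halt : solution_alt word =
      (word.toList.zip [(781 : Int), 156, 31, 6, 1]).foldl
        (fun total cw => total + pvVidx cw.1 * cw.2 + 1) 0 := rfl
  rw [halt, alt_eq_rkw word.toList h1 h2 h3']
  ring
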